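-- pv_equiv track=rewrite | github.com/usr-tony/stuff | jobs/seek/sortdata.py | job_gen
-- ===== SOURCE A (Python) =====
-- def job_gen(positives, negatives):
--     jobs_in_negatives = []
--     for l in negatives:
--         jobs_in_negatives += l
--
--     for job_list in positives:
--         other_lists = []
--         for li in positives:
--             if li != job_list:
--                 other_lists.append(li)
--
--         for job in job_list:
--             for li in other_lists:
--                 if job in li and job not in jobs_in_negatives:
--                     yield job
--                     break
-- ===== SOURCE B (Python) =====
-- def job_gen(positives, negatives):
--     blocked = set()
--     for l in negatives:
--         for job in l:
--             blocked.add(job)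
--     # keep one copy of each distinct list value, in first-appearance order
--     seen = set()
--     distinct = []
--     for li in positives:
--         t = tuple(li)
--         if t not in seen:
--             seen.add(t)
--             distinct.append(li)
--     # counts[job] = number of distinct list values that contain job
--     counts = {}
--     for li in distinct:
--         for job in set(li):
--             counts[job] = counts.get(job, 0) + 1
--     for job_list in positives:
--         for job in job_list:
--             if job not in blocked and counts.get(job, 0) >= 2:
--                 yield job
-- ===== Notes on version B (the rewrite author's own statement) =====
-- stated objective: faster
-- what changed: Instead of filtering the other lists and scanning them (and the flattened negatives) once per job occurrence, B precomputes a negatives set and a per-job count of the distinct list values containing it, then decides each job with two O(1) lookups (count >= 2 and not blocked).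
import Mathlib
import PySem

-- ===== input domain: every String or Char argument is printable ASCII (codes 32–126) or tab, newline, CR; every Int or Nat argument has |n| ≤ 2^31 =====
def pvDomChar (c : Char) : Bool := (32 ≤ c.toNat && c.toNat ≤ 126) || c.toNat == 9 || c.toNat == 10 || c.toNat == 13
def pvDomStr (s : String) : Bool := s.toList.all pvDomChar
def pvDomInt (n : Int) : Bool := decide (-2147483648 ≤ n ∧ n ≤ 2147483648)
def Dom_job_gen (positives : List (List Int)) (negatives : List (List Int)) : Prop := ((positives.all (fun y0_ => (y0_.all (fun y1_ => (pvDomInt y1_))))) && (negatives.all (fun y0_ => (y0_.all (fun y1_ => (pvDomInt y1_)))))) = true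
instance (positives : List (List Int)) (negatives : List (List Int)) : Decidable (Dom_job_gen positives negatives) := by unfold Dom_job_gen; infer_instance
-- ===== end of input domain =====

-- B replaces A's per-job scans of all other lists by a precomputed negatives set and a
-- per-job count of the distinct lists containing it (objective: faster).

-- ===== PORT A =====
def job_gen (positives : List (List Int)) (negatives : List (List Int)) : List Int :=
  let jobs_in_negatives : List Int := negatives.foldl (fun acc l => acc ++ l) []
  positives.foldl (fun acc job_list =>
    let other_lists : List (List Int) :=
      positives.foldl (fun o li => if ¬ (li = job_list) then o ++ [li] else o) []
    job_list.foldl (fun acc2 job =>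
      -- 'for li in other_lists: if job in li and job not in jobs_in_negatives: yield job; break'
      if other_lists.any (fun li => li.contains job && !(jobs_in_negatives.contains job))
      then acc2 ++ [job] else acc2) acc) []

-- ===== PORT B =====
def job_gen_alt (positives : List (List Int)) (negatives : List (List Int)) : List Int :=
  let blocked : PySem.Set Int :=
    negatives.foldl (fun s l => l.foldl (fun s job => PySem.Set.add s job) s) PySem.Set.empty
  -- (seen, distinct): one copy of each distinct list value, in first-appearance order
  let sd : PySem.Set (List Int) × List (List Int) :=
    positives.foldl (fun p li =>
      if PySem.Set.contains p.1 li then p else (PySem.Set.add p.1 li, p.2 ++ [li]))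
      (PySem.Set.empty, [])
  -- counts[job] = number of distinct list values containing job
  let counts : PySem.Dict Int Int :=
    sd.2.foldl (fun d li =>
      (PySem.Set.ofList li).foldl (fun d job => d.insert job (d.getD job 0 + 1)) d)
      PySem.Dict.empty
  positives.foldl (fun acc job_list =>
    job_list.foldl (fun acc2 job =>
      if !(PySem.Set.contains blocked job) && decide (2 ≤ counts.getD job 0)
      then acc2 ++ [job] else acc2) acc) []

-- ===== PRECONDITION & SPEC =====
def Spec_job_gen (positives : List (List Int)) (negatives : List (List Int)) (out : List Int) : Prop := out = job_gen_alt positives negatives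
instance (positives : List (List Int)) (negatives : List (List Int)) (out : List Int) : Decidable (Spec_job_gen positives negatives out) := by unfold Spec_job_gen; infer_instance

-- ===== CLAIM (what is proved, stated in full; the proofs are below) =====
def Claim_equal_job_gen : Prop := ∀ (positives : List (List Int)) (negatives : List (List Int)), Dom_job_gen positives negatives → Spec_job_gen positives negatives (job_gen positives negatives)

-- ===== LEMMAS AND PROOFS =====

theorem mem_blocked (negs : List (List Int)) (s : PySem.Set Int) (x : Int) :
    x ∈ negs.foldl (fun s l => l.foldl (fun s job => PySem.Set.add s job) s) s ↔
      x ∈ s ∨ ∃ l ∈ negs, x ∈ l := by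
  induction negs generalizing s with
  | nil => simp
  | cons h t ih =>
    have inner : ∀ (l : List Int) (s : PySem.Set Int),
        x ∈ l.foldl (fun s job => PySem.Set.add s job) s ↔ x ∈ s ∨ x ∈ l := by
      intro l
      induction l with
      | nil => simp
      | cons a t2 ih2 =>
        intro s
        simp [List.foldl_cons, ih2, PySem.Set.mem_add]
        tauto
    simp [List.foldl_cons, ih, inner]
    tauto

theorem sd_diagonal (pos : List (List Int)) (s : PySem.Set (List Int)) :
    pos.foldl (fun p li =>
      if PySem.Set.contains p.1 li then p else (PySem.Set.add p.1 li, p.2 ++ [li])) (s, s)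
    = (pos.foldl PySem.Set.add s, pos.foldl PySem.Set.add s) := by
  induction pos generalizing s with
  | nil => rfl
  | cons h t ih =>
    simp only [List.foldl_cons]
    have step : (if PySem.Set.contains s h then (s, s) else (PySem.Set.add s h, s ++ [h]))
        = (PySem.Set.add s h, PySem.Set.add s h) := by
      by_cases hm : h ∈ s <;> simp [PySem.Set.contains, PySem.Set.add, hm]
    rw [step, ih]

theorem counts_getD (distinct : List (List Int)) (d : PySem.Dict Int Int) (v : Int) :
    (distinct.foldl (fun d li =>
        (PySem.Set.ofList li).foldl (fun d job => d.insert job (d.getD job 0 + 1)) d) d).getD v 0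
    = d.getD v 0 + ((distinct.countP (fun li => decide (v ∈ li)) : Int)) := by
  induction distinct generalizing d with
  | nil => simp
  | cons h t ih =>
    simp only [List.foldl_cons, ih, PySem.Dict.getD_foldl_insert_add_one]
    have hc : (PySem.Set.ofList h).count v = if v ∈ h then 1 else 0 := by
      by_cases hm : v ∈ h
      · simp [hm]
      · simp [hm, List.count_eq_zero, PySem.Set.mem_ofList]
    rw [List.countP_cons]
    rw [hc]
    by_cases hm : v ∈ h <;> simp [hm] <;> ring

theorem two_mem_length {α : Type} {l : List α} {a b : α} (ha : a ∈ l) (hb : b ∈ l)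
    (hne : a ≠ b) : 2 ≤ l.length := by
  rcases List.append_of_mem ha with ⟨s, t, rfl⟩
  have hb' : b ∈ s ++ t := by
    rcases List.mem_append.mp hb with h | h
    · exact List.mem_append.mpr (Or.inl h)
    · rcases List.mem_cons.mp h with h | h
      · exact absurd h.symm hne
      · exact List.mem_append.mpr (Or.inr h)
  have : 1 ≤ (s ++ t).length := List.length_pos_of_mem hb'
  simp at this ⊢
  omega

theorem length_le_one_of_nodup {α : Type} {l : List α} {a : α} (hnd : l.Nodup)
    (h : ∀ x ∈ l, x = a) : l.length ≤ 1 := by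
  match l with
  | [] => simp
  | [x] => simp
  | x :: y :: t =>
    exfalso
    have hx := h x (by simp)
    have hy := h y (by simp)
    have : x ≠ y := (List.nodup_cons.mp hnd).1 ∘ (by intro he; simp [he])
    exact this (hx.trans hy.symm)

theorem key_iff (pos : List (List Int)) (job_list : List Int) (job : Int)
    (hjl : job_list ∈ pos) (hj : job ∈ job_list) :
    (∃ li ∈ pos, ¬ (li = job_list) ∧ job ∈ li) ↔
      2 ≤ (PySem.Set.ofList pos).countP (fun li => decide (job ∈ li)) := by
  rw [List.countP_eq_length_filter]
  constructor
  · rintro ⟨li, hmem, hne, hin⟩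
    have h1 : li ∈ (PySem.Set.ofList pos).filter (fun li => decide (job ∈ li)) := by
      simp [List.mem_filter, PySem.Set.mem_ofList, hmem, hin]
    have h2 : job_list ∈ (PySem.Set.ofList pos).filter (fun li => decide (job ∈ li)) := by
      simp [List.mem_filter, PySem.Set.mem_ofList, hjl, hj]
    exact two_mem_length h1 h2 hne
  · intro hlen
    by_contra hno
    push Not at hno
    have hall : ∀ x ∈ (PySem.Set.ofList pos).filter (fun li => decide (job ∈ li)), x = job_list := by
      intro x hx
      rcases List.mem_filter.mp hx with ⟨hx1, hx2⟩
      by_contra hxne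
      exact hno x ((PySem.Set.mem_ofList pos x).mp hx1) hxne (by simpa using hx2)
    have := length_le_one_of_nodup ((PySem.Set.nodup_ofList pos).filter _) hall
    omega

theorem sd_diagonal' (pos : List (List Int)) :
    pos.foldl (fun p li =>
      if PySem.Set.contains p.1 li then p else (PySem.Set.add p.1 li, p.2 ++ [li]))
      (PySem.Set.empty, [])
    = (pos.foldl PySem.Set.add PySem.Set.empty, pos.foldl PySem.Set.add PySem.Set.empty) :=
  sd_diagonal pos PySem.Set.empty

theorem cond_eq (pos : List (List Int)) (negs : List (List Int))
    (jl : List Int) (job : Int) (hjl : jl ∈ pos) (hj : job ∈ jl) :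
    ((pos.foldl (fun o li => if ¬ (li = jl) then o ++ [li] else o) []).any
        (fun li => li.contains job &&
          !((negs.foldl (fun acc l => acc ++ l) []).contains job)))
    = (!(PySem.Set.contains
          (negs.foldl (fun s l => l.foldl (fun s job => PySem.Set.add s job) s) PySem.Set.empty)
          job) &&
        decide (2 ≤ ((pos.foldl PySem.Set.add PySem.Set.empty).foldl
            (fun d li => (PySem.Set.ofList li).foldl
              (fun d job => d.insert job (d.getD job 0 + 1)) d)
            (PySem.Dict.empty : PySem.Dict Int Int)).getD job 0)) := by
  apply Bool.coe_iff_coe.mp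
  rw [PySem.List.foldl_append_ite_eq_filter, PySem.List.foldl_append_eq_flatten]
  simp only [List.any_eq_true, List.mem_filter, Bool.and_eq_true, Bool.not_eq_true',
    decide_eq_true_eq, List.contains_eq_mem, List.nil_append]
  rw [counts_getD, PySem.Dict.getD_empty, zero_add]
  have hblk : (PySem.Set.contains
      (negs.foldl (fun s l => l.foldl (fun s job => PySem.Set.add s job) s) PySem.Set.empty)
      job = false) ↔ ¬ job ∈ negs.flatten := by
    simp [PySem.Set.contains, mem_blocked, PySem.Set.empty, List.mem_flatten]
  have hcast : ((2:Int) ≤ ((PySem.Set.ofList pos).countP (fun li => decide (job ∈ li)) : Int))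
      ↔ 2 ≤ (PySem.Set.ofList pos).countP (fun li => decide (job ∈ li)) := by
    exact_mod_cast Iff.rfl
  have hofl : pos.foldl PySem.Set.add PySem.Set.empty = PySem.Set.ofList pos := by
    rw [PySem.Set.ofList_eq_foldl]; rfl
  rw [hofl] at *
  rw [hblk, hcast, ← key_iff pos jl job hjl hj]
  constructor
  · rintro ⟨li, ⟨hmem, hne⟩, hin, hnneg⟩
    exact ⟨by simpa using hnneg, li, hmem, by simpa using hne, by simpa using hin⟩
  · rintro ⟨hnneg, li, hmem, hne, hin⟩
    exact ⟨li, ⟨hmem, by simpa using hne⟩, by simpa using hin, by simpa using hnneg⟩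

-- ===== VERDICT (by name: the statement is the Claim_ definition above) =====
theorem job_gen_spec : Claim_equal_job_gen := by
  intro pos negs _
  show job_gen pos negs = job_gen_alt pos negs
  simp only [job_gen, job_gen_alt, sd_diagonal']
  apply PySem.List.foldl_congr_mem'
  intro jl hjl acc
  apply PySem.List.foldl_congr_mem'
  intro job hjob acc2
  rw [cond_eq pos negs jl job hjl hjob]
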